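-- pv_equiv track=rewrite | github.com/eriksjaastad/image-workflow-scripts | scripts/dashboard/project_metrics_aggregator.py | _sum_ops
-- ===== SOURCE A (Python) =====
-- from typing import Any, Dict, List, Optional, Tuple
--
-- def _sum_ops(records: List[Dict[str, Any]]) -> Tuple[int, Dict[str, int]]:
--     total = 0
--     by_type: Dict[str, int] = {}
--     for r in records:
--         op = r.get('operation') or 'unknown'
--         count = int(r.get('file_count') or 0)
--         by_type[op] = by_type.get(op, 0) + count
--         # Define "images processed" as crop operations primarily; fallback to all ops if crop absent
--         total += count if op == 'crop' else 0
--     if total == 0: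
--         total = sum(by_type.values())
--     return total, by_type
-- ===== SOURCE B (Python) =====
-- from typing import Any, Dict, List, Tuple
--
-- def _sum_ops(records: List[Dict[str, Any]]) -> Tuple[int, Dict[str, int]]:
--     # Normalize once to (op, count) pairs.
--     norm = [(r.get('operation') or 'unknown', int(r.get('file_count') or 0))
--             for r in records]
--     # Distinct ops in first-occurrence order, then one scan per key: no running table.
--     keys = list(dict.fromkeys(op for op, _ in norm))
--     by_type = {op: sum(c for o, c in norm if o == op) for op in keys}
--     crop = sum(c for o, c in norm if o == 'crop')
--     total = crop if crop != 0 else sum(c for _, c in norm)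
--     return total, by_type
-- ===== Notes on version B (the rewrite author's own statement) =====
-- stated objective: alternative
-- what changed: B replaces A's single pass maintaining a running dict and an inline crop accumulator by a group-by: dedup the operation keys in first-occurrence order, then compute each key's total (and the crop and grand totals) by independent filter-sum scans over the normalized pairs.
import Mathlib
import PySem

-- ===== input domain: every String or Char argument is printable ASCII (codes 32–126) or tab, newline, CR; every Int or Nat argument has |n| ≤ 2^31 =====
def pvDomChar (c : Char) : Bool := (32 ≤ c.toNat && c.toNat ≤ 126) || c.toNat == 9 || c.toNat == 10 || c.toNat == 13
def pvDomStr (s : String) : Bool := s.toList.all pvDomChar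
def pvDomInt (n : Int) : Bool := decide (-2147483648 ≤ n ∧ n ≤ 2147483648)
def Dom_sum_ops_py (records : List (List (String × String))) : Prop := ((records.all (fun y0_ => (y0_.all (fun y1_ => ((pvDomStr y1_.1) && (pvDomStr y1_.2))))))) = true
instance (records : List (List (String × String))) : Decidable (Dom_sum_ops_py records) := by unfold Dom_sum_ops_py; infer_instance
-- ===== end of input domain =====

-- B replaces A's single pass with a running dict and inline crop accumulator by a group-by:
-- dedup the keys, then one filter-sum scan per key (and for crop / the grand total).
-- Objective: alternative algorithm, same results.

-- ===== PORT A =====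
-- r.get(k) on a dict given as an association list: first match.
def pvAGet (r : List (String × String)) (k : String) : Option String :=
  (r.find? (fun p => p.1 == k)).map (·.2)

-- op = r.get('operation') or 'unknown'  (falsy = missing or empty string)
def pvOpOf (r : List (String × String)) : String :=
  match pvAGet r "operation" with
  | none => "unknown"
  | some s => if s = "" then "unknown" else s

-- count = int(r.get('file_count') or 0); int(s) raising ValueError is excluded by Pre_,
-- the getD 0 only totalizes the port there.
def pvCountOf (r : List (String × String)) : Int :=
  match pvAGet r "file_count" with
  | none => 0
  | some s => if s = "" then 0 else (PySem.Int.ofStr? s).getD 0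

def sum_ops_py (records : List (List (String × String))) : Int × (List (String × Int)) :=
  let st := records.foldl
    (fun (st : Int × PySem.Dict String Int) r =>
      let op := pvOpOf r
      let count := pvCountOf r
      let byType := st.2.insert op (st.2.getD op 0 + count)
      (st.1 + (if op = "crop" then count else 0), byType))
    (0, PySem.Dict.empty)
  let total := if st.1 = 0 then st.2.values.sum else st.1
  (total, st.2.items)

-- ===== PORT B =====
def sum_ops_py_alt (records : List (List (String × String))) : Int × (List (String × Int)) :=
  let norm := records.map (fun r => (pvOpOf r, pvCountOf r))
  let keys := PySem.List.dedup (norm.map (·.1))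
  let byType := keys.map (fun op => (op, ((norm.filter (fun p => p.1 == op)).map (·.2)).sum))
  let crop : Int := ((norm.filter (fun p => p.1 == "crop")).map (·.2)).sum
  let total := if crop = 0 then (norm.map (·.2)).sum else crop
  (total, byType)

-- ===== PRECONDITION & SPEC =====
-- Pre_ excludes exactly the records whose 'file_count' value is a nonempty string that
-- int() cannot parse (Python A raises ValueError there).
def Pre_sum_ops_py (records : List (List (String × String))) : Prop :=
  records.all (fun r => match pvAGet r "file_count" with
    | none => true
    | some s => s == "" || (PySem.Int.ofStr? s).isSome) = true

instance (records : List (List (String × String))) : Decidable (Pre_sum_ops_py records) := by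
  unfold Pre_sum_ops_py; infer_instance

def pvWitness_sum_ops_py : (List (List (String × String))) :=
  [[("operation", "crop"), ("file_count", "3")], [("operation", "resize")]]

def Spec_sum_ops_py (records : List (List (String × String))) (out : Int × (List (String × Int))) : Prop := out = sum_ops_py_alt records
instance (records : List (List (String × String))) (out : Int × (List (String × Int))) : Decidable (Spec_sum_ops_py records out) := by unfold Spec_sum_ops_py; infer_instance

-- ===== CLAIM =====
def Claim_equal_sum_ops_py : Prop := ∀ (records : List (List (String × String))), Dom_sum_ops_py records → Pre_sum_ops_py records → Spec_sum_ops_py records (sum_ops_py records)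

-- ===== LEMMAS AND PROOFS =====

-- A's combined fold splits: the total component accumulates the filter-sum of crop counts,
-- the dict component is the plain insert-add fold.
theorem pv_fold_split (l : List (String × Int)) (t : Int) (d : PySem.Dict String Int) :
    l.foldl
      (fun (st : Int × PySem.Dict String Int) p =>
        (st.1 + (if p.1 = "crop" then p.2 else 0), st.2.insert p.1 (st.2.getD p.1 0 + p.2)))
      (t, d)
    = (t + ((l.filter (fun p => p.1 == "crop")).map (·.2)).sum,
       l.foldl (fun d p => d.insert p.1 (d.getD p.1 0 + p.2)) d) := by
  induction l generalizing t d with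
  | nil => simp
  | cons p l ih =>
    simp only [List.foldl_cons, List.filter_cons, ih]
    by_cases h : p.1 = "crop"
    · simp [h]; ring
    · simp [h]

-- getD of the insert-add fold is the starting value plus the per-key filter-sum.
theorem pv_getD_fold (l : List (String × Int)) (d : PySem.Dict String Int) (k : String) :
    (l.foldl (fun d p => d.insert p.1 (d.getD p.1 0 + p.2)) d).getD k 0
    = d.getD k 0 + ((l.filter (fun p => p.1 == k)).map (·.2)).sum := by
  induction l generalizing d with
  | nil => simp
  | cons p l ih =>
    simp only [List.foldl_cons, List.filter_cons, ih, PySem.Dict.getD_insert]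
    by_cases h : k = p.1
    · subst h; simp; ring
    · have h' : ¬ p.1 = k := fun e => h e.symm
      simp [h, h']

-- Summing (if a = k then v else 0) over a Nodup list containing a gives v.
theorem pv_sum_ite_single {K : List String} (hn : K.Nodup) {a : String} (ha : a ∈ K) (v : Int) :
    (K.map (fun k => if a = k then v else 0)).sum = v := by
  induction K with
  | nil => cases ha
  | cons k K ih =>
    simp only [List.map_cons, List.sum_cons]
    rcases List.mem_cons.mp ha with h | h
    · subst h
      have : (K.map (fun k => if a = k then v else 0)).sum = 0 := by
        have : ∀ x ∈ K.map (fun k => if a = k then v else 0), x = 0 := by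
          intro x hx
          rcases List.mem_map.mp hx with ⟨k', hk', rfl⟩
          have : a ≠ k' := fun e => (List.nodup_cons.mp hn).1 (e ▸ hk')
          simp [this]
        simpa using List.sum_eq_zero this
      simp [this]
    · have : a ≠ k := fun e => (List.nodup_cons.mp hn).1 (e ▸ h)
      simp [this, ih (List.nodup_cons.mp hn).2 h]

-- Sum of the per-key filter-sums over a Nodup key list covering l equals the total sum.
theorem pv_sum_groups (l : List (String × Int)) (K : List String) (hn : K.Nodup)
    (hc : ∀ p ∈ l, p.1 ∈ K) :
    (K.map (fun k => ((l.filter (fun p => p.1 == k)).map (·.2)).sum)).sum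
    = (l.map (·.2)).sum := by
  induction l with
  | nil => simp
  | cons p l ih =>
    have hmem : p.1 ∈ K := hc p (List.mem_cons_self ..)
    have step : ∀ k, ((((p :: l).filter (fun q => q.1 == k)).map (·.2)).sum)
        = (if p.1 = k then p.2 else 0) + ((l.filter (fun q => q.1 == k)).map (·.2)).sum := by
      intro k
      simp only [List.filter_cons]
      by_cases h : p.1 = k <;> simp [h]
    simp only [step]
    rw [PySem.List.sum_map_add_int]
    rw [pv_sum_ite_single hn hmem, ih (fun q hq => hc q (List.mem_cons_of_mem _ hq))]
    simp


theorem sum_ops_py_eq_alt (records : List (List (String × String))) :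
    sum_ops_py records = sum_ops_py_alt records := by
  unfold sum_ops_py sum_ops_py_alt
  set norm := records.map (fun r => (pvOpOf r, pvCountOf r)) with hnorm
  have hfold : records.foldl
      (fun (st : Int × PySem.Dict String Int) r =>
        (st.1 + (if pvOpOf r = "crop" then pvCountOf r else 0),
         st.2.insert (pvOpOf r) (st.2.getD (pvOpOf r) 0 + pvCountOf r)))
      (0, PySem.Dict.empty)
      = norm.foldl
      (fun (st : Int × PySem.Dict String Int) p =>
        (st.1 + (if p.1 = "crop" then p.2 else 0), st.2.insert p.1 (st.2.getD p.1 0 + p.2)))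
      (0, PySem.Dict.empty) := by
    rw [hnorm, List.foldl_map]
  simp only []
  rw [hfold, pv_fold_split]
  set d := norm.foldl (fun d p => d.insert p.1 (d.getD p.1 0 + p.2)) PySem.Dict.empty with hd
  have hkeys : d.keys = PySem.List.dedup (norm.map (·.1)) := by
    rw [hd]
    have := PySem.Dict.keys_foldl_insert_key (l := norm) (key := (·.1))
      (f := fun d p => d.getD p.1 0 + p.2) (d := PySem.Dict.empty)
    rw [this]
    simp [PySem.Dict.keys_empty, PySem.Set.update_nil_left, PySem.List.dedup_eq_ofList]
  have hnodup : d.keys.Nodup := by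
    rw [hkeys]; exact PySem.List.nodup_dedup _
  have hgetD : ∀ k, d.getD k 0 = ((norm.filter (fun p => p.1 == k)).map (·.2)).sum := by
    intro k; rw [hd, pv_getD_fold]; simp
  have hitems : d.items = (PySem.List.dedup (norm.map (·.1))).map
      (fun op => (op, ((norm.filter (fun p => p.1 == op)).map (·.2)).sum)) := by
    rw [PySem.Dict.items_eq_map_keys d hnodup 0, hkeys]
    exact List.map_congr_left (fun k _ => by rw [hgetD k])
  have hvalues : d.values.sum = (norm.map (·.2)).sum := by
    rw [PySem.Dict.values_eq_map_keys d hnodup 0, hkeys]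
    have := List.map_congr_left (fun k (_ : k ∈ PySem.List.dedup (norm.map (·.1))) => hgetD k)
    rw [this]
    exact pv_sum_groups norm _ (PySem.List.nodup_dedup _)
      (fun p hp => (PySem.List.mem_dedup _ _).mpr (List.mem_map_of_mem hp))
  have hcrop : (0 : Int) + ((norm.filter (fun p => p.1 == "crop")).map (·.2)).sum
      = ((norm.filter (fun p => p.1 == "crop")).map (·.2)).sum := by ring
  simp only [hcrop, hitems, hvalues]

-- ===== VERDICT =====
theorem sum_ops_py_spec : Claim_equal_sum_ops_py := by
  intro records _ _
  unfold Spec_sum_ops_py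
  exact sum_ops_py_eq_alt records
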